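-- pv_equiv track=rewrite | github.com/PhaiNguyen597/Weekly_coding_challenges | nov_7.py | unique_styles
-- ===== SOURCE A (Python) =====
-- def unique_styles(lst):
--     tmp = []
--     for i in range(len(lst)):
--         tmp_str = lst[i].split(",")
--         for j in range(len(tmp_str)):
--             if tmp_str[j] not in tmp:
--                 tmp.append(tmp_str[j])
--     return len(tmp)
-- ===== SOURCE B (Python) =====
-- def unique_styles(lst):
--     tokens = []
--     for s in lst:
--         tokens.extend(s.split(","))
--     tokens.sort()
--     count = 0
--     prev = None
--     for t in tokens:
--         if prev is None or t != prev:
--             count += 1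
--         prev = t
--     return count
-- ===== Notes on version B (the rewrite author's own statement) =====
-- stated objective: faster
-- what changed: A dedups tokens with a linear membership test inside the collection loop (quadratic in the number of tokens); B flattens all comma-split tokens, sorts them once, and counts distinct elements in a single adjacent-difference pass over the sorted list.
import Mathlib
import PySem

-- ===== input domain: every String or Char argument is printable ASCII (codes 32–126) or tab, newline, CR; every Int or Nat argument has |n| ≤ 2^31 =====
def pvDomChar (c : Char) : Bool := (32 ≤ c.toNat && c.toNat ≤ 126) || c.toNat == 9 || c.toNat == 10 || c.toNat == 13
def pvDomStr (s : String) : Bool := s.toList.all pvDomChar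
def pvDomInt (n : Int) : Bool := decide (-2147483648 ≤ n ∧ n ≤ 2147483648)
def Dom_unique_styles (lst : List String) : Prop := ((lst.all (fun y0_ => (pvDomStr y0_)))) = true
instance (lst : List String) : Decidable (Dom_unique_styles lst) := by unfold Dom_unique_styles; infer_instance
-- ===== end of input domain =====

-- B replaces A's in-loop membership-test dedup by flatten → sort → one adjacent-difference distinct count (measured faster in a timing run).


-- ===== PORT A =====
-- s.split(",") — sep is the nonempty literal ",", so split? is always `some`
def pvSplitComma (s : String) : List String := (PySem.Str.split? s ",").getD []

def unique_styles (lst : List String) : Int :=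
  let tmp : List String :=
    lst.foldl (fun tmp s =>
      let tmp_str := pvSplitComma s
      tmp_str.foldl (fun tmp t => if t ∈ tmp then tmp else tmp ++ [t]) tmp) []
  (tmp.length : Int)

-- ===== PORT B =====
def unique_styles_alt (lst : List String) : Int :=
  let tokens : List String := lst.foldl (fun acc s => acc ++ pvSplitComma s) []
  let tokens := PySem.List.sorted tokens (fun x => x) false
  let r : Int × Option String :=
    tokens.foldl (fun st t =>
      (if st.2 = none ∨ ¬ st.2 = some t then st.1 + 1 else st.1, some t)) (0, none)
  r.1

-- ===== PRECONDITION & SPEC =====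
def Spec_unique_styles (lst : List String) (out : Int) : Prop := out = unique_styles_alt lst
instance (lst : List String) (out : Int) : Decidable (Spec_unique_styles lst out) := by unfold Spec_unique_styles; infer_instance

-- ===== CLAIM (what is proved, stated in full; the proofs are below) =====
def Claim_equal_unique_styles : Prop := ∀ (lst : List String), Dom_unique_styles lst → Spec_unique_styles lst (unique_styles lst)

-- ===== LEMMAS AND PROOFS =====

-- A's dedup step
def pvStep (tmp : List String) (t : String) : List String :=
  if t ∈ tmp then tmp else tmp ++ [t]

-- A's fold maintains a nodup list whose elements are the seen tokens
lemma pvStep_invariant (ts : List String) : ∀ (tmp : List String), tmp.Nodup →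
    (ts.foldl pvStep tmp).Nodup ∧ (ts.foldl pvStep tmp).toFinset = tmp.toFinset ∪ ts.toFinset := by
  induction ts with
  | nil => intro tmp h; simpa using h
  | cons x xs ih =>
    intro tmp h
    simp only [List.foldl_cons]
    by_cases hx : x ∈ tmp
    · rw [show pvStep tmp x = tmp from by simp [pvStep, hx]]
      have := ih tmp h
      refine ⟨this.1, ?_⟩
      rw [this.2]
      have hxm : x ∈ tmp.toFinset := by simpa using hx
      ext y; simp only [Finset.mem_union, List.toFinset_cons, Finset.mem_insert]
      constructor
      · rintro (h1 | h2); exact Or.inl h1; exact Or.inr (Or.inr h2)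
      · rintro (h1 | h2 | h3)
        · exact Or.inl h1
        · exact Or.inl (h2 ▸ hxm)
        · exact Or.inr h3
    · rw [show pvStep tmp x = tmp ++ [x] from by simp [pvStep, hx]]
      have hnd : (tmp ++ [x]).Nodup := by
        rw [List.nodup_append]
        exact ⟨h, by simp, by intro a ha b hb e; rw [List.mem_singleton] at hb; exact hx (hb ▸ e ▸ ha)⟩
      have := ih (tmp ++ [x]) hnd
      refine ⟨this.1, ?_⟩
      rw [this.2]
      ext y; simp

-- A's result counts the distinct tokens of ts
lemma pvStep_card (ts : List String) : (ts.foldl pvStep []).length = ts.toFinset.card := by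
  obtain ⟨hnd, hfs⟩ := pvStep_invariant ts [] (by simp)
  rw [← List.toFinset_card_of_nodup hnd, hfs]
  simp

-- B's scan step
def pvScan (st : Int × Option String) (t : String) : Int × Option String :=
  (if st.2 = none ∨ ¬ st.2 = some t then st.1 + 1 else st.1, some t)

-- on a sorted list, the adjacent-difference scan counts distinct elements
lemma pvScan_sorted (ts : List String) : ∀ (prev : String) (c : Int),
    (prev :: ts).Pairwise (· ≤ ·) →
    (ts.foldl pvScan (c, some prev)).1 = c + ((prev :: ts).toFinset.card : Int) - 1 := by
  induction ts with
  | nil => intro prev c _; simp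
  | cons x xs ih =>
    intro prev c h
    have hle : prev ≤ x := (List.pairwise_cons.mp h).1 x (by simp)
    have htail : (x :: xs).Pairwise (· ≤ ·) := (List.pairwise_cons.mp h).2
    simp only [List.foldl_cons]
    by_cases hx : x = prev
    · have : pvScan (c, some prev) x = (c, some x) := by
        simp [pvScan, hx]
      rw [this, ih x c htail]
      have : (prev :: x :: xs).toFinset = (x :: xs).toFinset := by
        subst hx; simp
      rw [this]
    · have : pvScan (c, some prev) x = (c + 1, some x) := by
        simp [pvScan]
        intro hcontra; exact hx hcontra.symm
      rw [this, ih x (c + 1) htail]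
      have hlt : prev < x := lt_of_le_of_ne hle (fun e => hx e.symm)
      have hnot : prev ∉ (x :: xs).toFinset := by
        simp only [List.toFinset_cons, Finset.mem_insert, List.mem_toFinset]
        push Not
        refine ⟨fun e => hx e.symm, fun hmem => ?_⟩
        have : x ≤ prev := (List.pairwise_cons.mp htail).1 prev hmem
        exact absurd (lt_of_lt_of_le hlt this) (lt_irrefl prev)
      have : (prev :: x :: xs).toFinset.card = (x :: xs).toFinset.card + 1 := by
        simp only [List.toFinset_cons (a := prev)]
        rw [Finset.card_insert_of_notMem hnot]
      rw [this]
      push_cast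
      ring

-- B's scan from the initial (0, none) state counts distinct elements of a sorted list
lemma pvScan_count (ts : List String) (h : ts.Pairwise (· ≤ ·)) :
    (ts.foldl pvScan (0, none)).1 = (ts.toFinset.card : Int) := by
  cases ts with
  | nil => simp
  | cons x xs =>
    simp only [List.foldl_cons]
    have h0 : pvScan (0, none) x = (1, some x) := by simp [pvScan]
    rw [h0, pvScan_sorted xs x 1 h]
    ring

-- the flattening fold is flatMap
lemma pvFlat_eq (lst : List String) :
    lst.foldl (fun acc s => acc ++ pvSplitComma s) [] = lst.flatMap pvSplitComma := by
  simpa using PySem.List.foldl_append_eq_flatMap pvSplitComma lst []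

-- A's nested fold equals the fold over the flattened token list
lemma pvNested_eq (lst : List String) : ∀ (tmp : List String),
    lst.foldl (fun tmp s => (pvSplitComma s).foldl pvStep tmp) tmp
      = (lst.flatMap pvSplitComma).foldl pvStep tmp := by
  induction lst with
  | nil => intro tmp; simp
  | cons s rest ih => intro tmp; simp [List.foldl_append, ih]

-- ===== VERDICT (by name: the statement is the Claim_ definition above) =====
theorem unique_styles_spec : Claim_equal_unique_styles := by
  intro lst _
  unfold Spec_unique_styles unique_styles unique_styles_alt
  simp only []
  rw [pvFlat_eq]
  set flat := lst.flatMap pvSplitComma with hflat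
  have hA : lst.foldl (fun tmp s =>
      (pvSplitComma s).foldl (fun tmp t => if t ∈ tmp then tmp else tmp ++ [t]) tmp) []
      = flat.foldl pvStep [] := by
    rw [hflat, ← pvNested_eq]
    rfl
  rw [hA]
  have hB : (PySem.List.sorted flat (fun x => x) false).foldl
      (fun st t => (if st.2 = none ∨ ¬ st.2 = some t then st.1 + 1 else st.1, some t)) ((0 : Int), (none : Option String))
      = (PySem.List.sorted flat (fun x => x) false).foldl pvScan (0, none) := rfl
  rw [hB, pvScan_count _ (by simpa using PySem.List.sorted_pairwise flat (fun x => x))]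
  have hperm : (PySem.List.sorted flat (fun x => x) false).Perm flat :=
    PySem.List.sorted_perm flat (fun x => x) false
  rw [List.toFinset_eq_of_perm _ _ hperm, pvStep_card]
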